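-- pv_equiv track=rewrite | github.com/AbrilFranco/API | app.py | bfs
-- ===== SOURCE A (Python) =====
-- from queue import Queue
--
-- def bfs(estado_inicial, estado_final):
--     queue = Queue()
--     queue.put([estado_inicial])
--     visited = set()
--
--     while not queue.empty():
--         path = queue.get()
--         state = path[-1]
--
--         if state == estado_final:
--             return path
--
--         if tuple(state) not in visited:
--             visited.add(tuple(state))
--
--             for i in range(len(state) - 1):
--                 new_state = state[:]
--                 new_state[i], new_state[i + 1] = new_state[i + 1], new_state[i]
--                 queue.put(path + [new_state])
--
--     return None
-- ===== SOURCE B (Python) =====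
-- def bfs(estado_inicial, estado_final):
--     # Parent-map BFS: enqueue bare states (not whole paths), record the first
--     # enqueuer of each state in `parent`, and rebuild the path on success.
--     parent = {tuple(estado_inicial): None}
--     frontier = [tuple(estado_inicial)]
--     head = 0
--     while head < len(frontier):
--         t = frontier[head]
--         head += 1
--         if list(t) == estado_final:
--             path = []
--             cur = t
--             while cur is not None:
--                 path.append(list(cur))
--                 cur = parent[cur]
--             path.reverse()
--             return path
--         for i in range(len(t) - 1):
--             child = t[:i] + (t[i + 1], t[i]) + t[i + 2:]
--             if child not in parent:
--                 parent[child] = t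
--                 frontier.append(child)
--     return None
-- ===== Notes on version B (the rewrite author's own statement) =====
-- stated objective: faster
-- what changed: B replaces A's path-carrying BFS (queue of whole paths, visited marked at dequeue) by a parent-map BFS: the queue holds bare states, each state is recorded once at first enqueue in a predecessor dict, and the path is rebuilt by walking the parent chain only on success.
import Mathlib
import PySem

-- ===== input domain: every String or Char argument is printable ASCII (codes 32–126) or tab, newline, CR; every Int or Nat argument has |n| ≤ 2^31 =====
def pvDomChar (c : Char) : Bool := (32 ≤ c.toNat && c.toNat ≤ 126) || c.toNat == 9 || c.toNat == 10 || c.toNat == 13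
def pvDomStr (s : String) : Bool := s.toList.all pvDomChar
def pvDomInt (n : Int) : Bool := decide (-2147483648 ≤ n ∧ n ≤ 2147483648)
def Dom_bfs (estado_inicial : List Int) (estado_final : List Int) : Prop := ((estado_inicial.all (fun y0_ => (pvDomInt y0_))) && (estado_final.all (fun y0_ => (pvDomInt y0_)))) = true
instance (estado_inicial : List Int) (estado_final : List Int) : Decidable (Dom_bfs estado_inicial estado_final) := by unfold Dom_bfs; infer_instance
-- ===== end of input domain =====

-- B replaces A's path-carrying BFS by a parent-map BFS (queue of bare states, predecessor
-- dict recorded at first enqueue, path rebuilt only on success); objective: faster.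

-- ===== PORT A =====
-- A's 'while not queue.empty()' loop; the FIFO queue.Queue is the list q (put = append at
-- the back, get = take the head).  The fuel argument only totalises the loop (the Python
-- loop terminates: visited states are permutations of estado_inicial, so finitely many
-- expansions happen) and is consumed one unit per EXPANSION; a skipped visited entry
-- recurses on a shorter queue instead, so the recursion is on (fuel, queue length) lex.
def swapCopy (state : List Int) (i : Int) : List Int :=
  -- new_state = state[:]; new_state[i], new_state[i+1] = new_state[i+1], new_state[i]
  let ns := PySem.List.slice state none none
  PySem.List.pySetD (PySem.List.pySetD ns i (PySem.List.pyGetD ns (i + 1) 0))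
    (i + 1) (PySem.List.pyGetD ns i 0)

def bfsLoop (fin : List Int) : Nat → List (List (List Int)) → PySem.Set (List Int) → Option (List (List Int))
  | _, [], _ => none                          -- queue.empty(): fall out of the loop, return None
  | f, path :: rest, visited =>
    let state := PySem.List.pyGetD path (-1) []        -- state = path[-1] (path is never empty)
    if state = fin then some path
    else if state ∈ visited then bfsLoop fin f rest visited
    else match f with
      | 0 => none
      | f + 1 =>
        bfsLoop fin f
          (rest ++ (PySem.List.pyRange 0 ((state.length : Int) - 1) 1).map (fun i =>
            path ++ [swapCopy state i]))
          (PySem.Set.add visited state)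
termination_by f q _ => (f, q.length)

def bfs (estado_inicial : List Int) (estado_final : List Int) : Option (List (List Int)) :=
  bfsLoop estado_final ((estado_inicial.length + 2) ^ (estado_inicial.length + 2))
    [[estado_inicial]] PySem.Set.empty

-- ===== PORT B =====
-- child = t[:i] + (t[i+1], t[i]) + t[i+2:]  (indices in range for the i's the loop visits)
def swapTuple (t : List Int) (i : Int) : List Int :=
  PySem.List.slice t none (some i) ++
    [PySem.List.pyGetD t (i + 1) 0, PySem.List.pyGetD t i 0] ++
    PySem.List.slice t (some (i + 2)) none

-- 'while cur is not None: path.append(list(cur)); cur = parent[cur]'.  The fuel only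
-- totalises the while loop (parent chains are acyclic, so ≤ parent.size steps happen);
-- parent[cur] is read with getD — exact here, since cur is always a recorded key.
def rebuild (parent : PySem.Dict (List Int) (Option (List Int))) :
    Nat → Option (List Int) → List (List Int) → Option (List (List Int))
  | _, none, acc => some acc
  | 0, some _, _ => none
  | f + 1, some t, acc => rebuild parent f (PySem.Dict.getD parent t none) (acc ++ [t])

-- B's 'while head < len(frontier)' cursor loop: the consumed prefix of the Python list is
-- dropped, so frontier[head] is the head of the list here.  Fuel totalises as in A's port
-- (one unit per expansion; never exhausted for the fuel bfs_alt passes).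
def bfsAltLoop (fin : List Int) : Nat → List (List Int) →
    PySem.Dict (List Int) (Option (List Int)) → Option (List (List Int))
  | _, [], _ => none                          -- head = len(frontier): fall out, return None
  | f, t :: rest, parent =>
    if t = fin then
      match rebuild parent (parent.size + 1) (some t) [] with
      | some path => some path.reverse        -- path.reverse(); return path
      | none => none                          -- unreachable: parent chains are acyclic
    else match f with
      | 0 => none
      | f + 1 =>
        let st := (PySem.List.pyRange 0 ((t.length : Int) - 1) 1).foldl
          (fun (st : List (List Int) × PySem.Dict (List Int) (Option (List Int))) i =>
            let child := swapTuple t i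
            if PySem.Dict.contains st.2 child then st
            else (st.1 ++ [child], PySem.Dict.insert st.2 child (some t)))
          (rest, parent)
        bfsAltLoop fin f st.1 st.2
termination_by f _ _ => f

def bfs_alt (estado_inicial : List Int) (estado_final : List Int) : Option (List (List Int)) :=
  bfsAltLoop estado_final ((estado_inicial.length + 2) ^ (estado_inicial.length + 2))
    [estado_inicial] (PySem.Dict.insert PySem.Dict.empty estado_inicial none)

-- ===== PRECONDITION & SPEC =====
def Spec_bfs (estado_inicial : List Int) (estado_final : List Int) (out : Option (List (List Int))) : Prop := out = bfs_alt estado_inicial estado_final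
instance (estado_inicial : List Int) (estado_final : List Int) (out : Option (List (List Int))) : Decidable (Spec_bfs estado_inicial estado_final out) := by unfold Spec_bfs; infer_instance

-- ===== CLAIM (what is proved, stated in full; the proofs are below) =====
def Claim_equal_bfs : Prop := ∀ (estado_inicial : List Int) (estado_final : List Int), Dom_bfs estado_inicial estado_final → Spec_bfs estado_inicial estado_final (bfs estado_inicial estado_final)

-- ===== LEMMAS AND PROOFS =====

-- last element of a path, as A reads it
def lastOf (p : List (List Int)) : List Int := PySem.List.pyGetD p (-1) []

-- one-step unfolding of the two loops (their recursion is by well-founded fuel)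
lemma bfsLoop_nil (fin : List Int) (f : Nat) (v : PySem.Set (List Int)) :
    bfsLoop fin f [] v = none := by
  rw [bfsLoop.eq_def]

lemma bfsLoop_cons (fin : List Int) (f : Nat) (p : List (List Int))
    (rest : List (List (List Int))) (v : PySem.Set (List Int)) :
    bfsLoop fin f (p :: rest) v =
      (if lastOf p = fin then some p
       else if lastOf p ∈ v then bfsLoop fin f rest v
       else match f with
         | 0 => none
         | f + 1 =>
            bfsLoop fin f
              (rest ++ (PySem.List.pyRange 0
                  (((lastOf p).length : Int) - 1) 1).map
                (fun i => p ++ [swapCopy (lastOf p) i]))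
              (PySem.Set.add v (lastOf p))) := by
  rw [bfsLoop.eq_def]; rfl

lemma bfsAltLoop_nil (fin : List Int) (f : Nat)
    (P : PySem.Dict (List Int) (Option (List Int))) :
    bfsAltLoop fin f [] P = none := by
  rw [bfsAltLoop.eq_def]

lemma bfsAltLoop_cons (fin : List Int) (f : Nat) (t : List Int) (rest : List (List Int))
    (P : PySem.Dict (List Int) (Option (List Int))) :
    bfsAltLoop fin f (t :: rest) P =
      (if t = fin then
        match rebuild P (P.size + 1) (some t) [] with
        | some path => some path.reverse
        | none => none
      else match f with
        | 0 => none
        | f + 1 =>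
          bfsAltLoop fin f
            ((PySem.List.pyRange 0 ((t.length : Int) - 1) 1).foldl
              (fun (st : List (List Int) × PySem.Dict (List Int) (Option (List Int))) i =>
                let child := swapTuple t i
                if PySem.Dict.contains st.2 child then st
                else (st.1 ++ [child], PySem.Dict.insert st.2 child (some t)))
              (rest, P)).1
            ((PySem.List.pyRange 0 ((t.length : Int) - 1) 1).foldl
              (fun (st : List (List Int) × PySem.Dict (List Int) (Option (List Int))) i =>
                let child := swapTuple t i
                if PySem.Dict.contains st.2 child then st
                else (st.1 ++ [child], PySem.Dict.insert st.2 child (some t)))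
              (rest, P)).2) := by
  rw [bfsAltLoop.eq_def]

-- the subsequence of queued paths A will actually expand or return (first path per state)
def sift (v : PySem.Set (List Int)) : List (List (List Int)) → List (List (List Int))
  | [] => []
  | p :: rest => if lastOf p ∈ v then sift v rest else p :: sift (PySem.Set.add v (lastOf p)) rest

-- the visited-accumulator after scanning a queue segment
def siftAcc (v : PySem.Set (List Int)) : List (List (List Int)) → PySem.Set (List Int)
  | [] => v
  | p :: rest => if lastOf p ∈ v then siftAcc v rest else siftAcc (PySem.Set.add v (lastOf p)) rest

-- rp (a path, goal first) is a parent chain recorded in P down to the start state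
def RChain (P : PySem.Dict (List Int) (Option (List Int))) : List (List Int) → Prop
  | [] => False
  | [s] => PySem.Dict.get? P s = some none
  | s :: t :: rest => PySem.Dict.get? P s = some (some t) ∧ RChain P (t :: rest)

-- P' preserves every binding of P
def DExt (P P' : PySem.Dict (List Int) (Option (List Int))) : Prop :=
  ∀ k w, PySem.Dict.get? P k = some w → PySem.Dict.get? P' k = some w

-- the simulation invariant between A's loop state and B's loop state
def SimInv (fin : List Int) (v : PySem.Set (List Int)) (qA : List (List (List Int)))
    (qB : List (List Int)) (P : PySem.Dict (List Int) (Option (List Int))) : Prop :=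
  (∀ p ∈ qA, p ≠ []) ∧
  fin ∉ v ∧
  qB = (sift v qA).map lastOf ∧
  (∀ p ∈ sift v qA, RChain P p.reverse ∧ p.length ≤ P.size) ∧
  (∀ s : List Int, PySem.Dict.contains P s = true ↔ (s ∈ v ∨ s ∈ qB))

lemma reverse_eq_last_cons (p : List (List Int)) (h : p ≠ []) :
    p.reverse = lastOf p :: p.dropLast.reverse := by
  rcases List.eq_nil_or_concat p with rfl | ⟨q, x, rfl⟩
  · exact absurd rfl h
  · simp [lastOf, PySem.List.pyGetD_neg_one_append_singleton]

lemma rchain_mono {P P' : PySem.Dict (List Int) (Option (List Int))} (hext : DExt P P') :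
    ∀ rp, RChain P rp → RChain P' rp := by
  intro rp
  induction rp with
  | nil => exact fun h => h
  | cons s rest ih =>
    cases rest with
    | nil => exact fun h => hext s none h
    | cons t rest' =>
      rintro ⟨h1, h2⟩
      exact ⟨hext s (some t) h1, ih h2⟩

lemma rebuild_spec (P : PySem.Dict (List Int) (Option (List Int))) :
    ∀ (rest : List (List Int)) (s : List Int) (f : Nat) (acc : List (List Int)),
      RChain P (s :: rest) → rest.length + 1 ≤ f →
      rebuild P f (some s) acc = some (acc ++ s :: rest) := by
  intro rest
  induction rest with
  | nil =>
    intro s f acc hc hf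
    obtain ⟨f', rfl⟩ : ∃ f', f = f' + 1 := ⟨f - 1, by omega⟩
    have : PySem.Dict.getD P s none = none := PySem.Dict.getD_of_get?_eq_some _ _ hc
    simp [rebuild, this]
  | cons t rest' ih =>
    intro s f acc hc hf
    obtain ⟨f', rfl⟩ : ∃ f', f = f' + 1 := ⟨f - 1, by omega⟩
    have h1 : PySem.Dict.getD P s none = some t :=
      PySem.Dict.getD_of_get?_eq_some _ _ hc.1
    have hlen : rest'.length + 1 ≤ f' := by simp at hf; omega
    have := ih t f' (acc ++ [s]) hc.2 hlen
    simp only [rebuild, h1, this]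
    simp

lemma sift_append (v : PySem.Set (List Int)) (xs ys : List (List (List Int))) :
    sift v (xs ++ ys) = sift v xs ++ sift (siftAcc v xs) ys := by
  induction xs generalizing v with
  | nil => simp [sift, siftAcc]
  | cons a rest ih =>
    simp only [List.cons_append, sift, siftAcc]
    split
    · exact ih v
    · simp [ih]

lemma mem_siftAcc (v : PySem.Set (List Int)) (q : List (List (List Int))) (x : List Int) :
    x ∈ siftAcc v q ↔ x ∈ v ∨ x ∈ (sift v q).map lastOf := by
  induction q generalizing v with
  | nil => simp [sift, siftAcc]
  | cons a rest ih =>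
    simp only [sift, siftAcc]
    split
    · rw [ih]
    · rw [ih]
      simp [PySem.Set.mem_add]
      tauto

-- B's slice-built child equals A's copy-and-swap child, for every index the loop visits.
lemma swap_take_drop (s : List Int) (k : Nat) (hk : k + 1 < s.length) :
    s.take k ++ s.getD (k + 1) 0 :: s.getD k 0 :: s.drop (k + 2)
      = (s.set k (s.getD (k + 1) 0)).set (k + 1) (s.getD k 0) := by
  induction k generalizing s with
  | zero =>
    match s, hk with
    | a :: b :: t, _ => simp
  | succ k ih =>
    match s, hk with
    | a :: t, hk =>
      have ht : k + 1 < t.length := by simpa using hk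
      simpa using ih t ht

lemma child_eq (s : List Int) (i : Int) (h0 : 0 ≤ i) (h1 : i < (s.length : Int) - 1) :
    swapTuple s i = swapCopy s i := by
  obtain ⟨k, rfl⟩ := Int.eq_ofNat_of_zero_le h0
  have h1 : ((k : Int) + 1) = ((k + 1 : Nat) : Int) := by push_cast; ring
  have h2 : ((k : Int) + 2) = ((k + 2 : Nat) : Int) := by push_cast; ring
  simp only [swapTuple, swapCopy, PySem.List.slice_none_none, h1, h2,
    PySem.List.slice_to_natCast, PySem.List.slice_from_natCast,
    PySem.List.pyGetD_natCast, PySem.List.pySetD_natCast]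
  simpa using swap_take_drop s k (by omega)

-- the child scan: B's fold over the children matches the sift of A's appended child paths
def scanFold (s : List Int) (st0 : List (List Int) × PySem.Dict (List Int) (Option (List Int)))
    (cs : List (List Int)) : List (List Int) × PySem.Dict (List Int) (Option (List Int)) :=
  cs.foldl
    (fun st c =>
      if PySem.Dict.contains st.2 c then st
      else (st.1 ++ [c], PySem.Dict.insert st.2 c (some s)))
    st0

lemma lastOf_append (p : List (List Int)) (c : List Int) : lastOf (p ++ [c]) = c :=
  PySem.List.pyGetD_neg_one_append_singleton p c []

lemma scan (p : List (List Int)) (hp : p ≠ []) (s : List Int) (hs : lastOf p = s) :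
    ∀ (cs : List (List Int)) (v : PySem.Set (List Int)) (front : List (List Int))
      (P : PySem.Dict (List Int) (Option (List Int))),
      (∀ x, PySem.Dict.contains P x = true ↔ x ∈ v) →
      RChain P p.reverse → p.length ≤ P.size →
      (scanFold s (front, P) cs).1
          = front ++ (sift v (cs.map (fun c => p ++ [c]))).map lastOf ∧
        (∀ x, PySem.Dict.contains (scanFold s (front, P) cs).2 x = true
          ↔ x ∈ siftAcc v (cs.map (fun c => p ++ [c]))) ∧
        DExt P (scanFold s (front, P) cs).2 ∧
        P.size ≤ (scanFold s (front, P) cs).2.size ∧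
        (∀ q ∈ sift v (cs.map (fun c => p ++ [c])),
          RChain (scanFold s (front, P) cs).2 q.reverse ∧
            q.length ≤ (scanFold s (front, P) cs).2.size) := by
  intro cs
  induction cs with
  | nil =>
    intro v front P hk hchain hlen
    exact ⟨by simp [scanFold, sift], by simpa [scanFold, siftAcc] using hk,
      fun k w h => h, le_refl _, by simp [sift]⟩
  | cons c cs' ih =>
    intro v front P hk hchain hlen
    by_cases hc : PySem.Dict.contains P c = true
    · have hcv : c ∈ v := (hk c).1 hc
      have hstep : scanFold s (front, P) (c :: cs') = scanFold s (front, P) cs' := by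
        simp [scanFold, hc]
      have hsift : sift v ((c :: cs').map (fun c => p ++ [c]))
          = sift v (cs'.map (fun c => p ++ [c])) := by
        simp [sift, lastOf_append, hcv]
      have hacc : siftAcc v ((c :: cs').map (fun c => p ++ [c]))
          = siftAcc v (cs'.map (fun c => p ++ [c])) := by
        simp [siftAcc, lastOf_append, hcv]
      rw [hstep, hsift, hacc]
      exact ih v front P hk hchain hlen
    · have hcv : c ∉ v := fun h => hc ((hk c).2 h)
      have hget : PySem.Dict.get? P c = none := by
        rw [PySem.Dict.contains_eq_isSome_get?] at hc
        cases h : PySem.Dict.get? P c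
        · rfl
        · rw [h] at hc; simp at hc
      have hext : DExt P (PySem.Dict.insert P c (some s)) := by
        intro k w h
        have hne : k ≠ c := by
          intro e; subst e; rw [h] at hget; cases hget
        rw [PySem.Dict.get?_insert_of_ne _ _ hne]
        exact h
      have hk' : ∀ x, PySem.Dict.contains (PySem.Dict.insert P c (some s)) x = true
          ↔ x ∈ PySem.Set.add v c := by
        intro x
        rw [PySem.Dict.contains_insert, PySem.Set.mem_add]
        simp only [Bool.or_eq_true, beq_iff_eq]
        rw [hk x]
        tauto
      have hchain' : RChain (PySem.Dict.insert P c (some s)) p.reverse :=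
        rchain_mono hext _ hchain
      have hsz : (PySem.Dict.insert P c (some s)).size = P.size + 1 := by
        rw [PySem.Dict.size_insert]; simp [hc]
      obtain ⟨c1, c2, c3, c4, c5⟩ :=
        ih (PySem.Set.add v c) (front ++ [c]) (PySem.Dict.insert P c (some s)) hk'
          hchain' (by omega)
      have hstep : scanFold s (front, P) (c :: cs')
          = scanFold s (front ++ [c], PySem.Dict.insert P c (some s)) cs' := by
        simp [scanFold, hc]
      rw [hstep]
      have hsift : sift v ((c :: cs').map (fun c => p ++ [c]))
          = (p ++ [c]) :: sift (PySem.Set.add v c) (cs'.map (fun c => p ++ [c])) := by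
        simp [sift, lastOf_append, hcv]
      have hacc : siftAcc v ((c :: cs').map (fun c => p ++ [c]))
          = siftAcc (PySem.Set.add v c) (cs'.map (fun c => p ++ [c])) := by
        simp [siftAcc, lastOf_append, hcv]
      refine ⟨?_, ?_, ?_, ?_, ?_⟩
      · rw [hsift]; simp [c1, lastOf_append]
      · intro x; rw [hacc]; exact c2 x
      · exact fun k w h => c3 k w (hext k w h)
      · omega
      · intro q hq
        rw [hsift] at hq
        rcases List.mem_cons.1 hq with rfl | hq
        · constructor
          · apply rchain_mono c3
            have hrev : (p ++ [c]).reverse = c :: s :: p.dropLast.reverse := by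
              rw [List.reverse_append, reverse_eq_last_cons p hp, hs]
              rfl
            rw [hrev]
            refine ⟨PySem.Dict.get?_insert_self _ _ _, ?_⟩
            have := hchain'
            rw [reverse_eq_last_cons p hp, hs] at this
            exact this
          · have : (p ++ [c]).length = p.length + 1 := by simp
            omega
        · exact c5 q hq

-- one-to-one simulation of the two loops under the invariant
lemma sim (fin : List Int) : ∀ (f : Nat) (qA : List (List (List Int)))
    (v : PySem.Set (List Int)) (qB : List (List Int))
    (P : PySem.Dict (List Int) (Option (List Int))),
    SimInv fin v qA qB P → bfsLoop fin f qA v = bfsAltLoop fin f qB P := by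
  intro f
  induction f using Nat.strong_induction_on with
  | _ f ihf =>
  intro qA
  induction qA with
  | nil =>
    intro v qB P hI
    obtain ⟨-, -, hqB, -, -⟩ := hI
    have hqBnil : qB = [] := by simpa [sift] using hqB
    subst hqBnil
    rw [bfsLoop_nil, bfsAltLoop_nil]
  | cons p rest ihq =>
    intro v qB P hI
    obtain ⟨hne, hfv, hqB, hch, hk⟩ := hI
    by_cases hfin : lastOf p = fin
    · -- A returns the found path; B rebuilds it from the parent map
      have hsv : lastOf p ∉ v := hfin ▸ hfv
      have hsift : sift v (p :: rest)
          = p :: sift (PySem.Set.add v (lastOf p)) rest := by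
        simp [sift, hsv]
      have hqB' : qB = lastOf p
          :: (sift (PySem.Set.add v (lastOf p)) rest).map lastOf := by
        rw [hqB, hsift]; rfl
      subst hqB'
      have hpmem : p ∈ sift v (p :: rest) := by rw [hsift]; exact List.mem_cons_self
      obtain ⟨hchain, hlen⟩ := hch p hpmem
      have hpne : p ≠ [] := hne p List.mem_cons_self
      have hrev : p.reverse = lastOf p :: p.dropLast.reverse :=
        reverse_eq_last_cons p hpne
      have hdl : p.dropLast.reverse.length + 1 ≤ P.size + 1 := by
        have h1 : p.dropLast.length = p.length - 1 := List.length_dropLast (xs := p)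
        have h2 : 0 < p.length := List.length_pos_iff.2 hpne
        simp only [List.length_reverse]
        omega
      have hreb : rebuild P (P.size + 1) (some (lastOf p)) []
          = some ([] ++ lastOf p :: p.dropLast.reverse) :=
        rebuild_spec P p.dropLast.reverse (lastOf p) (P.size + 1) []
          (by rw [← hrev]; exact hchain) hdl
      rw [bfsLoop_cons, bfsAltLoop_cons, if_pos hfin, if_pos hfin, hreb]
      rw [← hrev]
      simp
    · by_cases hv : lastOf p ∈ v
      · -- A skips an already-expanded state; B's state is unchanged
        have hsift : sift v (p :: rest) = sift v rest := by simp [sift, hv]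
        rw [bfsLoop_cons, if_neg hfin, if_pos hv]
        exact ihq v qB P ⟨fun q hq => hne q (List.mem_cons_of_mem _ hq), hfv,
          by rw [hqB, hsift], by rw [hsift] at hch; exact hch,
          by intro x; rw [hk]⟩
      · -- both expand the same state
        have hsift : sift v (p :: rest)
            = p :: sift (PySem.Set.add v (lastOf p)) rest := by simp [sift, hv]
        have hqB' : qB = lastOf p
            :: (sift (PySem.Set.add v (lastOf p)) rest).map lastOf := by
          rw [hqB, hsift]; rfl
        subst hqB'
        have hpne : p ≠ [] := hne p List.mem_cons_self
        obtain ⟨hchain, hlen⟩ := hch p (by rw [hsift]; exact List.mem_cons_self)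
        rw [bfsLoop_cons, bfsAltLoop_cons, if_neg hfin, if_neg hfin, if_neg hv]
        cases f with
        | zero => rfl
        | succ f' =>
          -- the children as B computes them
          obtain ⟨c1, c2, c3, c4, c5⟩ :=
            scan p hpne (lastOf p) rfl
              ((PySem.List.pyRange 0 (((lastOf p).length : Int) - 1) 1).map
                (swapTuple (lastOf p)))
              (siftAcc (PySem.Set.add v (lastOf p)) rest)
              ((sift (PySem.Set.add v (lastOf p)) rest).map lastOf) P
              (by
                intro x
                rw [hk x, mem_siftAcc, PySem.Set.mem_add]
                simp only [List.mem_cons]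
                tauto)
              hchain hlen
          -- B's fold is scanFold over those children
          have hfold : ((PySem.List.pyRange 0
                (((lastOf p).length : Int) - 1) 1).foldl
              (fun (st : List (List Int) × PySem.Dict (List Int) (Option (List Int))) i =>
                let child := swapTuple (lastOf p) i
                if PySem.Dict.contains st.2 child then st
                else (st.1 ++ [child],
                  PySem.Dict.insert st.2 child (some (lastOf p))))
              ((sift (PySem.Set.add v (lastOf p)) rest).map lastOf, P))
              = scanFold (lastOf p)
                  ((sift (PySem.Set.add v (lastOf p)) rest).map lastOf, P)
                  ((PySem.List.pyRange 0 (((lastOf p).length : Int) - 1) 1).map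
                    (swapTuple (lastOf p))) := by
            rw [scanFold, List.foldl_map]
          -- A's appended child paths are the same children, path-extended
          have hcs : (PySem.List.pyRange 0
                (((lastOf p).length : Int) - 1) 1).map
                (fun i => p ++ [swapCopy (lastOf p) i])
              = ((PySem.List.pyRange 0 (((lastOf p).length : Int) - 1) 1).map
                  (swapTuple (lastOf p))).map (fun c => p ++ [c]) := by
            rw [List.map_map]
            apply List.map_congr_left
            intro i hi
            rw [PySem.List.mem_pyRange_one] at hi
            simp only [Function.comp_apply]
            rw [child_eq _ i hi.1 hi.2]
          rw [hfold, hcs]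
          apply ihf f' (Nat.lt_succ_self f')
          refine ⟨?_, ?_, ?_, ?_, ?_⟩
          · intro q hq
            rcases List.mem_append.1 hq with hq | hq
            · exact hne q (List.mem_cons_of_mem _ hq)
            · obtain ⟨c, -, rfl⟩ := List.mem_map.1 hq
              simp
          · rw [PySem.Set.mem_add]
            rintro (h | h)
            · exact hfv h
            · exact hfin h.symm
          · rw [sift_append, List.map_append, c1]
          · intro q hq
            rw [sift_append] at hq
            rcases List.mem_append.1 hq with hq | hq
            · obtain ⟨hc, hl⟩ := hch q (by rw [hsift]; exact List.mem_cons_of_mem _ hq)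
              exact ⟨rchain_mono c3 _ hc, le_trans hl c4⟩
            · exact c5 q hq
          · intro x
            rw [c2 x, c1, mem_siftAcc, mem_siftAcc]
            simp only [List.mem_append]
            exact or_assoc

-- ===== VERDICT (by name: the statement is the Claim_ definition above) =====
theorem bfs_spec : Claim_equal_bfs := by
  intro ini fin _
  show bfs ini fin = bfs_alt ini fin
  unfold bfs bfs_alt
  apply sim
  refine ⟨by simp, by simp [PySem.Set.empty], ?_, ?_, ?_⟩
  · have : lastOf [ini] = ini := PySem.List.pyGetD_neg_one_append_singleton [] ini []
    simp [sift, PySem.Set.empty, this]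
  · intro p hp
    have : sift PySem.Set.empty [[ini]] = [[ini]] := by
      simp [sift, PySem.Set.empty]
    rw [this] at hp
    simp at hp
    subst hp
    constructor
    · exact PySem.Dict.get?_insert_self _ _ _
    · simp [PySem.Dict.size_insert, PySem.Dict.contains_empty, PySem.Dict.size_empty]
  · intro x
    have : lastOf [ini] = ini := PySem.List.pyGetD_neg_one_append_singleton [] ini []
    simp [PySem.Dict.contains_insert, PySem.Dict.contains_empty,
      PySem.Set.empty]
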